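-- pv_equiv track=rewrite | github.com/nguyencongtuyenlp/AI-Digest-v2 | nodes/gather_news.py | _extract_facebook_permalink
-- ===== SOURCE A (Python) =====
-- def _normalize_facebook_permalink(url: str) -> str:
--     raw = str(url or "").strip()
--     if not raw:
--         return ""
--     raw = raw.replace("m.facebook.com", "www.facebook.com").replace("mbasic.facebook.com", "www.facebook.com")
--     if "/groups/" in raw and ("/posts/" in raw or "/videos/" in raw):
--         raw = raw.split("?", 1)[0]
--     raw = raw.split("?__cft__=", 1)[0]
--     raw = raw.split("&__cft__=", 1)[0]
--     raw = raw.split("&__tn__=", 1)[0]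
--     raw = raw.split("?__tn__=", 1)[0]
--     return raw
--
-- def _extract_facebook_permalink(links: list[str]) -> str:
--     preferred_patterns = (
--         "/posts/",
--         "/groups/",
--         "/permalink.php",
--         "/share/p/",
--         "/videos/",
--     )
--     normalized_links = [_normalize_facebook_permalink(link) for link in links if str(link or "").strip()]
--     for pattern in preferred_patterns:
--         for link in normalized_links:
--             if pattern == "/groups/" and "/posts/" not in link:
--                 continue
--             if pattern in link:
--                 return link
--     return normalized_links[0] if normalized_links else ""
-- ===== SOURCE B (Python) =====
-- def _normalize_facebook_permalink(url: str) -> str: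
--     raw = str(url or "").strip()
--     if not raw:
--         return ""
--     raw = raw.replace("m.facebook.com", "www.facebook.com").replace("mbasic.facebook.com", "www.facebook.com")
--     if "/groups/" in raw and ("/posts/" in raw or "/videos/" in raw):
--         raw = raw.split("?", 1)[0]
--     raw = raw.split("?__cft__=", 1)[0]
--     raw = raw.split("&__cft__=", 1)[0]
--     raw = raw.split("&__tn__=", 1)[0]
--     raw = raw.split("?__tn__=", 1)[0]
--     return raw
--
-- def _extract_facebook_permalink(links: list[str]) -> str:
--     preferred_patterns = (
--         "/posts/",
--         "/groups/",
--         "/permalink.php",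
--         "/share/p/",
--         "/videos/",
--     )
--     normalized_links = [_normalize_facebook_permalink(link) for link in links if str(link or "").strip()]
--     best = None
--     best_prio = None
--     for link in normalized_links:
--         for i, pattern in enumerate(preferred_patterns):
--             if pattern == "/groups/" and "/posts/" not in link:
--                 continue
--             if pattern in link:
--                 if best_prio is None or i < best_prio:
--                     best_prio, best = i, link
--                 break
--     if best is not None:
--         return best
--     return normalized_links[0] if normalized_links else ""
-- ===== Notes on version B (the rewrite author's own statement) =====
-- stated objective: alternative
-- what changed: Replaces the pattern-major nested loops (one full scan of the link list per pattern) with a single left-to-right pass over the normalized links that tracks the best link by the index of the first pattern it matches, updating only on strictly smaller priority so the earliest link wins ties.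
import Mathlib
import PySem

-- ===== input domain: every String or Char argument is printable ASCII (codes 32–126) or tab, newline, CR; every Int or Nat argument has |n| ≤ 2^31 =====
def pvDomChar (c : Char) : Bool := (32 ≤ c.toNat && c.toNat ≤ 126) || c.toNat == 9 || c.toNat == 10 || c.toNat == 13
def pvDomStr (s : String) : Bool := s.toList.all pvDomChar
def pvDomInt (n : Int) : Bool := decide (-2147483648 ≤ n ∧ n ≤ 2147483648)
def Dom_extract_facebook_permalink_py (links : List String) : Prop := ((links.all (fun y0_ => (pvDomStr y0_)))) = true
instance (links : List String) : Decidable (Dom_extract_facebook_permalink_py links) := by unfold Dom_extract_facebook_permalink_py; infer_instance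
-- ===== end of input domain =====

-- B replaces A's pattern-major nested scans with one pass over the links tracking the
-- best (smallest pattern-index) match, first link winning ties: an alternative decomposition.


-- ===== PORT A =====
-- s.split(sep, 1)[0] for a nonempty sep (all seps below are literals ≠ ""): splitMax? is
-- some on sep ≠ "" and split always yields a nonempty list, so the defaults never fire.
def pvSplitHead (s sep : String) : String :=
  ((PySem.Str.splitMax? s sep 1).getD [s]).headD s

-- port of _normalize_facebook_permalink (shared helper of both Pythons)
def pvNormFB (url : String) : String :=
  let raw := PySem.Str.strip url   -- str(url or "").strip(): url or "" is url itself unless "", strip agrees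
  if raw = "" then ""
  else
    let raw := PySem.Str.replace (PySem.Str.replace raw "m.facebook.com" "www.facebook.com")
                 "mbasic.facebook.com" "www.facebook.com"
    let raw := if PySem.Str.isIn "/groups/" raw
                  && (PySem.Str.isIn "/posts/" raw || PySem.Str.isIn "/videos/" raw)
               then pvSplitHead raw "?" else raw
    let raw := pvSplitHead raw "?__cft__="
    let raw := pvSplitHead raw "&__cft__="
    let raw := pvSplitHead raw "&__tn__="
    pvSplitHead raw "?__tn__="

def pvPatterns : List String := ["/posts/", "/groups/", "/permalink.php", "/share/p/", "/videos/"]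

-- the two ifs of the inner loop body: 'continue' on /groups/ without /posts/, then 'pattern in link'
def pvMatch (p link : String) : Bool :=
  if p == "/groups/" && !(PySem.Str.isIn "/posts/" link) then false
  else PySem.Str.isIn p link

-- A's inner loop: first link matching the pattern
def pvLoopLinks (p : String) : List String → Option String
  | [] => none
  | l :: rest => if pvMatch p l then some l else pvLoopLinks p rest

-- A's outer loop over the patterns
def pvLoopPatterns : List String → List String → Option String
  | [], _ => none
  | p :: ps, ns =>
    match pvLoopLinks p ns with
    | some l => some l
    | none => pvLoopPatterns ps ns

def extract_facebook_permalink_py (links : List String) : String :=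
  let ns := (links.filter (fun l => !(PySem.Str.strip l == ""))).map pvNormFB
  match pvLoopPatterns pvPatterns ns with
  | some l => l
  | none => ns.headD ""

-- ===== PORT B =====
-- B's inner loop: for i, pattern in enumerate(preferred_patterns): continue / break-on-match
def pvPrioLoop : List (Int × String) → String → Option Int
  | [], _ => none
  | (i, p) :: rest, l => if pvMatch p l then some i else pvPrioLoop rest l

-- one step of B's single pass: update the best (priority, link) on strictly smaller priority
def pvStep (acc : Option (Int × String)) (l : String) : Option (Int × String) :=
  match pvPrioLoop (PySem.List.enumerate pvPatterns 0) l with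
  | none => acc
  | some i =>
    match acc with
    | none => some (i, l)
    | some (j, _) => if i < j then some (i, l) else acc

def extract_facebook_permalink_py_alt (links : List String) : String :=
  let ns := (links.filter (fun l => !(PySem.Str.strip l == ""))).map pvNormFB
  match ns.foldl pvStep none with
  | some (_, b) => b
  | none => ns.headD ""

-- ===== PRECONDITION & SPEC =====
def Spec_extract_facebook_permalink_py (links : List String) (out : String) : Prop := out = extract_facebook_permalink_py_alt links
instance (links : List String) (out : String) : Decidable (Spec_extract_facebook_permalink_py links out) := by unfold Spec_extract_facebook_permalink_py; infer_instance

-- ===== CLAIM (what is proved, stated in full; the proofs are below) =====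
def Claim_equal_extract_facebook_permalink_py : Prop := ∀ (links : List String), Dom_extract_facebook_permalink_py links → Spec_extract_facebook_permalink_py links (extract_facebook_permalink_py links)

-- ===== LEMMAS AND PROOFS =====

-- left-biased combine by smaller priority (proof-side model of pvStep's update rule)
def pvCmb : Option (Int × String) → Option (Int × String) → Option (Int × String)
  | x, none => x
  | none, some y => some y
  | some (j, b), some (i, l) => if i < j then some (i, l) else some (j, b)

-- A's pattern-major search, remembering the pattern's index
def pvChain : List (Int × String) → List String → Option (Int × String)
  | [], _ => none
  | (i, p) :: rest, ns =>
    match pvLoopLinks p ns with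
    | some l => some (i, l)
    | none => pvChain rest ns

theorem pvCmb_none_left (y : Option (Int × String)) : pvCmb none y = y := by
  cases y with
  | none => rfl
  | some y => rfl

theorem pvCmb_assoc (a b c : Option (Int × String)) :
    pvCmb (pvCmb a b) c = pvCmb a (pvCmb b c) := by
  rcases a with _ | ⟨j, x⟩ <;> rcases b with _ | ⟨i, y⟩ <;> rcases c with _ | ⟨k, z⟩ <;>
    simp [pvCmb] <;> split_ifs <;> simp [pvCmb] <;> split_ifs <;> first | rfl | omega

theorem pvStep_eq_cmb (acc : Option (Int × String)) (l : String) :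
    pvStep acc l = pvCmb acc ((pvPrioLoop (PySem.List.enumerate pvPatterns 0) l).map (fun i => (i, l))) := by
  unfold pvStep
  cases h : pvPrioLoop (PySem.List.enumerate pvPatterns 0) l with
  | none => cases acc <;> simp [pvCmb]
  | some i => rcases acc with _ | ⟨j, b⟩ <;> simp [pvCmb]

theorem pvPrioLoop_mem (ips : List (Int × String)) (l : String) (k : Int)
    (h : pvPrioLoop ips l = some k) : ∃ p, (k, p) ∈ ips := by
  induction ips with
  | nil => simp [pvPrioLoop] at h
  | cons ip rest ih =>
    obtain ⟨i, p⟩ := ip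
    by_cases hm : pvMatch p l
    · simp [pvPrioLoop, hm] at h
      exact ⟨p, by simp [h]⟩
    · simp [pvPrioLoop, hm] at h
      obtain ⟨q, hq⟩ := ih h
      exact ⟨q, by simp [hq]⟩

theorem pvChain_mem (ips : List (Int × String)) (ns : List String) (k : Int) (x : String)
    (h : pvChain ips ns = some (k, x)) : ∃ p, (k, p) ∈ ips := by
  induction ips with
  | nil => simp [pvChain] at h
  | cons ip rest ih =>
    obtain ⟨i, p⟩ := ip
    cases hl : pvLoopLinks p ns with
    | some l =>
      simp [pvChain, hl] at h
      exact ⟨p, by simp [h]⟩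
    | none =>
      simp [pvChain, hl] at h
      obtain ⟨q, hq⟩ := ih h
      exact ⟨q, by simp [hq]⟩

-- cons decomposition of A's search, for strictly increasing pattern indices
theorem pvChain_cons (ips : List (Int × String)) (l : String) (ns : List String)
    (hinc : ips.Pairwise (fun a b => a.1 < b.1)) :
    pvChain ips (l :: ns) = pvCmb ((pvPrioLoop ips l).map (fun i => (i, l))) (pvChain ips ns) := by
  induction ips with
  | nil => simp [pvChain, pvPrioLoop, pvCmb]
  | cons ip rest ih =>
    obtain ⟨i, p⟩ := ip
    rw [List.pairwise_cons] at hinc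
    obtain ⟨hlt, htl⟩ := hinc
    by_cases hm : pvMatch p l
    · -- head pattern matches l: A finds l at priority i; everything in rest has larger index
      simp only [pvChain, pvLoopLinks, hm, if_pos, pvPrioLoop]
      cases hc : pvLoopLinks p ns with
      | some x => simp [pvCmb]
      | none =>
        cases hr : pvChain rest ns with
        | none => simp [pvCmb]
        | some kx =>
          obtain ⟨k, x⟩ := kx
          obtain ⟨q, hq⟩ := pvChain_mem rest ns k x hr
          have : i < k := hlt (k, q) hq
          simp only [pvCmb, Option.map_some]
          rw [if_neg (by omega)]
    · -- head pattern does not match l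
      simp only [pvChain, pvLoopLinks, hm, if_neg, Bool.false_eq_true, not_false_iff, pvPrioLoop]
      cases hc : pvLoopLinks p ns with
      | some x =>
        cases hpr : pvPrioLoop rest l with
        | none => simp [pvCmb]
        | some k =>
          obtain ⟨q, hq⟩ := pvPrioLoop_mem rest l k hpr
          have : i < k := hlt (k, q) hq
          simp only [pvCmb, Option.map_some]
          rw [if_pos (by omega)]
      | none => exact ih htl

theorem pvFoldl_eq_chain (ns : List String) (acc : Option (Int × String)) :
    ns.foldl pvStep acc = pvCmb acc (pvChain (PySem.List.enumerate pvPatterns 0) ns) := by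
  induction ns generalizing acc with
  | nil =>
    have h : pvChain (PySem.List.enumerate pvPatterns 0) [] = none := by decide
    cases acc <;> simp [h, pvCmb]
  | cons l ns ih =>
    have hinc : (PySem.List.enumerate pvPatterns 0).Pairwise (fun a b => a.1 < b.1) := by decide
    rw [List.foldl_cons, ih, pvStep_eq_cmb, pvCmb_assoc, ← pvChain_cons _ _ _ hinc]

-- A's outer loop forgets the indices pvChain carries
theorem pvLoopPatterns_eq_chain (ips : List (Int × String)) (ns : List String) :
    pvLoopPatterns (ips.map (·.2)) ns = (pvChain ips ns).map (·.2) := by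
  induction ips with
  | nil => simp [pvLoopPatterns, pvChain]
  | cons ip rest ih =>
    obtain ⟨i, p⟩ := ip
    cases hl : pvLoopLinks p ns with
    | some l => simp [pvLoopPatterns, pvChain, hl]
    | none => simp [pvLoopPatterns, pvChain, hl, ih]

-- ===== VERDICT (by name: the statement is the Claim_ definition above) =====
theorem pv_main (ns : List String) :
    (match pvLoopPatterns pvPatterns ns with
     | some l => l
     | none => ns.headD "") =
    (match ns.foldl pvStep none with
     | some (_, b) => b
     | none => ns.headD "") := by
  have hpat : pvPatterns = (PySem.List.enumerate pvPatterns 0).map (·.2) := by decide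
  rw [hpat, pvLoopPatterns_eq_chain, pvFoldl_eq_chain, pvCmb_none_left]
  cases h : pvChain (PySem.List.enumerate pvPatterns 0) ns with
  | none => rfl
  | some kx => obtain ⟨k, x⟩ := kx; rfl

theorem extract_facebook_permalink_py_spec : Claim_equal_extract_facebook_permalink_py := by
  intro links _
  unfold Spec_extract_facebook_permalink_py extract_facebook_permalink_py extract_facebook_permalink_py_alt
  exact pv_main ((links.filter (fun l => !(PySem.Str.strip l == ""))).map pvNormFB)
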